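-- pv_equiv track=rewrite | github.com/szaross/WDI | Zestaw_2/t_01.py | f
-- ===== SOURCE A (Python) =====
-- def f(n):
--     a,b=1,1
--     x,y=1,1
--     c=b
--     while c<=n:
--         while c*b<=n:
--             if c*b==n:
--                 return True
--             a,b=b,a+b
--         x,y=y,x+y
--         c=y
--         a,b=y,x+y
--     return False
-- ===== SOURCE B (Python) =====
-- def f(n):
--     fibs = set()
--     a, b = 1, 1
--     while a <= n:
--         fibs.add(a)
--         a, b = b, a + b
--     for p in fibs:
--         if n % p == 0 and n // p in fibs and n // p != p:
--             return True
--     return n == 1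
-- ===== Notes on version B (the rewrite author's own statement) =====
-- stated objective: alternative
-- what changed: Replaces A's nested generate-and-multiply Fibonacci loops with a single Fibonacci table (set) built once, followed by a divisor/membership scan: for each Fibonacci divisor p of the input, check that the cofactor is a different Fibonacci number, with a constant-time fallback for the trivial case.
import Mathlib
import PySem

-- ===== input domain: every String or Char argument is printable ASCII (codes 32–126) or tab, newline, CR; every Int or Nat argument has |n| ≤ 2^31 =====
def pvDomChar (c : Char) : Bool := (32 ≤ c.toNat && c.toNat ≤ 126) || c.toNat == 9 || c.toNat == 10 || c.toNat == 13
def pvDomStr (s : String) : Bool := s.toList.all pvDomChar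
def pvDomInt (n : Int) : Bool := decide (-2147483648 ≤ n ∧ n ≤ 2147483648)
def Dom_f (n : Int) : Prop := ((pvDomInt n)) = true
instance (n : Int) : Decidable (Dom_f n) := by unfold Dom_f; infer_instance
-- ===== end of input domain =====

-- B replaces A's nested generate-and-multiply Fibonacci loops by one Fibonacci table plus a
-- divisor/membership scan (alternative decomposition, similar cost).

-- ===== PORT A =====
-- inner 'while c*b<=n' loop of A; the Nat argument is a fuel bound (a totality guard only:
-- the fuel chosen in f is proved sufficient, the 0 branch is never reached)
def fInner : Nat → Int → Int → Int → Int → Bool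
  | 0, _, _, _, _ => false
  | (fuel+1), n, c, a, b =>
    if c * b ≤ n then
      if c * b = n then true else fInner fuel n c b (a + b)
    else false

-- outer 'while c<=n' loop of A (state a,b,x,y,c), fuel-guarded the same way
def fOuter : Nat → Int → Int → Int → Int → Int → Int → Bool
  | 0, _, _, _, _, _, _ => false
  | (fuel+1), n, a, b, x, y, c =>
    if c ≤ n then
      if fInner (n+1).toNat n c a b then true
      else fOuter fuel n (x + y) (y + (x + y)) y (x + y) (x + y)
    else false

def f (n : Int) : Bool := fOuter (n+1).toNat n 1 1 1 1 1

-- ===== PORT B =====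
-- 'while a<=n: fibs.add(a); a,b=b,a+b' of B, fuel-guarded the same way
def fibSet : Nat → Int → Int → Int → PySem.Set Int → PySem.Set Int
  | 0, _, _, _, s => s
  | (fuel+1), n, a, b, s =>
    if a ≤ n then fibSet fuel n b (a + b) (PySem.Set.add s a) else s

def f_alt (n : Int) : Bool :=
  let s := fibSet (n+2).toNat n 1 1 PySem.Set.empty
  (s.any (fun p =>
      decide (PySem.Int.mod n p = 0) &&
      PySem.Set.contains s (PySem.Int.floordiv n p) &&
      decide (PySem.Int.floordiv n p ≠ p)))
    || decide (n = 1)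

-- ===== PRECONDITION & SPEC =====
def Spec_f (n : Int) (out : Bool) : Prop := out = f_alt n
instance (n : Int) (out : Bool) : Decidable (Spec_f n out) := by unfold Spec_f; infer_instance

-- ===== CLAIM (what is proved, stated in full; the proofs are below) =====
def Claim_equal_f : Prop := ∀ (n : Int), Dom_f n → Spec_f n (f n)

-- ===== LEMMAS AND PROOFS =====

-- shifted Fibonacci sequence 1,1,2,3,5,8,…
def fib : Nat → Int
  | 0 => 1
  | 1 => 1
  | (k+2) => fib k + fib (k+1)

theorem fib_pos : ∀ k, 1 ≤ fib k
  | 0 => le_refl 1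
  | 1 => le_refl 1
  | (k+2) => by
      have h1 := fib_pos k
      have h2 := fib_pos (k+1)
      show 1 ≤ fib k + fib (k+1)
      omega

theorem fib_le_succ : ∀ k, fib k ≤ fib (k+1)
  | 0 => le_refl 1
  | (k+1) => by
      have := fib_pos k
      show fib (k+1) ≤ fib k + fib (k+1)
      omega

theorem fib_lt_succ (k : Nat) (hk : 1 ≤ k) : fib k < fib (k+1) := by
  obtain ⟨j, rfl⟩ : ∃ j, k = j + 1 := ⟨k - 1, by omega⟩
  have := fib_pos j
  show fib (j+1) < fib j + fib (j+1)
  omega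

theorem fib_mono {i j : Nat} (h : i ≤ j) : fib i ≤ fib j := by
  induction j with
  | zero => have hi : i = 0 := by omega
            simp [hi]
  | succ j ih =>
      rcases Nat.lt_or_ge i (j+1) with h' | h'
      · exact le_trans (ih (by omega)) (fib_le_succ j)
      · have : i = j + 1 := by omega
        simp [this]

theorem fib_strict_mono {i j : Nat} (hi : 1 ≤ i) (h : i < j) : fib i < fib j := by
  have h1 : fib i < fib (i+1) := fib_lt_succ i hi
  have h2 : fib (i+1) ≤ fib j := fib_mono (by omega)
  omega

theorem fib_ge_index (k : Nat) : (k : Int) ≤ fib k := by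
  induction k using fib.induct with
  | case1 => norm_num [fib]
  | case2 => norm_num [fib]
  | case3 k ih1 ih2 =>
      have h1 := fib_pos k
      show ((k : Int) + 2) ≤ fib k + fib (k+1)
      push_cast at ih2
      omega

theorem fib_index_lt {i j : Nat} (h : fib i < fib j) : i < j := by
  by_contra hc
  have := fib_mono (Nat.le_of_not_lt hc)
  omega

-- common specification: n is 1, or a product of two distinct Fibonacci values
def P (n : Int) : Prop :=
  n = 1 ∨ ∃ p q : Int, (∃ i : Nat, 1 ≤ i ∧ fib i = p) ∧ (∃ j : Nat, 1 ≤ j ∧ fib j = q) ∧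
    p < q ∧ p * q = n

theorem P_pos {n : Int} (h : P n) : 1 ≤ n := by
  rcases h with h | ⟨p, q, ⟨i, _, hp⟩, ⟨j, _, hq⟩, hpq, he⟩
  · omega
  · have h1 := fib_pos i
    have h2 := fib_pos j
    nlinarith [hp, hq, he]

theorem innerChar (fuel : Nat) (n c : Int) (hc : 1 ≤ c) (j : Nat)
    (hfuel : (n + 1 - c * fib (j+1)).toNat < fuel) :
    fInner fuel n c (fib j) (fib (j+1)) = true ↔
      ∃ i, j + 1 ≤ i ∧ c * fib i = n := by
  induction fuel generalizing j with
  | zero => omega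
  | succ t ih =>
    show (if c * fib (j+1) ≤ n then
        if c * fib (j+1) = n then true else fInner t n c (fib (j+1)) (fib j + fib (j+1))
      else false) = true ↔ _
    by_cases h : c * fib (j+1) ≤ n
    · rw [if_pos h]
      by_cases he : c * fib (j+1) = n
      · rw [if_pos he]
        simp only [true_iff]
        exact ⟨j+1, le_refl _, he⟩
      · rw [if_neg he]
        have hdec : (n + 1 - c * fib (j+1+1)).toNat < t := by
          have h1 := fib_pos j
          have h2 : 1 ≤ c * fib j := by nlinarith
          have h3 : c * fib (j+1+1) = c * fib j + c * fib (j+1) := by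
            rw [show fib (j+1+1) = fib j + fib (j+1) from rfl]; ring
          omega
        have step := ih (j+1) hdec
        constructor
        · intro hh
          obtain ⟨i, hi, hie⟩ := step.mp hh
          exact ⟨i, by omega, hie⟩
        · rintro ⟨i, hi, hie⟩
          rcases Nat.lt_or_ge i (j+2) with h' | h'
          · have hij : i = j + 1 := by omega
            subst hij; exact absurd hie he
          · exact step.mpr ⟨i, h', hie⟩
    · rw [if_neg h]
      simp only [Bool.false_eq_true, false_iff]
      rintro ⟨i, hi, hie⟩
      have h1 : fib (j+1) ≤ fib i := fib_mono hi
      have h2 : c * fib (j+1) ≤ c * fib i := by nlinarith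
      omega

theorem outerChar (fuel : Nat) (n : Int) (m : Nat) (hm : 1 ≤ m)
    (hfuel : (n + 1 - fib (m+1)).toNat < fuel) :
    fOuter fuel n (fib (m+1)) (fib (m+2)) (fib m) (fib (m+1)) (fib (m+1)) = true ↔
      ∃ j i : Nat, m + 1 ≤ j ∧ j + 1 ≤ i ∧ fib j * fib i = n := by
  induction fuel generalizing m with
  | zero => omega
  | succ t ih =>
    show (if fib (m+1) ≤ n then
        if fInner (n+1).toNat n (fib (m+1)) (fib (m+1)) (fib (m+2)) then true
        else fOuter t n (fib m + fib (m+1)) (fib (m+1) + (fib m + fib (m+1)))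
          (fib (m+1)) (fib m + fib (m+1)) (fib m + fib (m+1))
      else false) = true ↔ _
    by_cases h : fib (m+1) ≤ n
    · rw [if_pos h]
      have hn1 : 1 ≤ n := le_trans (fib_pos (m+1)) h
      have hin := innerChar (n+1).toNat n (fib (m+1)) (fib_pos (m+1)) (m+1) (by
        have h1 := fib_pos (m+1)
        have h2 := fib_pos (m+2)
        have h3 : fib (m+1) ≤ fib (m+1) * fib (m+1+1) := by nlinarith
        omega)
      split
      · next hi =>
          simp only [true_iff]
          obtain ⟨i, hi1, hi2⟩ := hin.mp hi
          exact ⟨m+1, i, le_refl _, by omega, hi2⟩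
      · next hi =>
          have hdec : (n + 1 - fib (m+1+1)).toNat < t := by
            clear hin hi ih
            have h1 := fib_pos m
            have h2 : fib (m+1+1) = fib m + fib (m+1) := rfl
            omega
          have step := ih (m+1) (by omega) hdec
          constructor
          · intro hh
            obtain ⟨j, i, hj, hji, he⟩ := step.mp hh
            exact ⟨j, i, by omega, hji, he⟩
          · rintro ⟨j, i, hj, hji, he⟩
            rcases Nat.lt_or_ge j (m+2) with h' | h'
            · have hjm : j = m + 1 := by omega
              subst hjm
              exact absurd (hin.mpr ⟨i, by omega, he⟩) hi
            · exact step.mpr ⟨j, i, h', hji, he⟩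
    · rw [if_neg h]
      simp only [Bool.false_eq_true, false_iff]
      rintro ⟨j, i, hj, hji, he⟩
      have h1 : fib (m+1) ≤ fib j := fib_mono (by omega)
      have h2 : 1 ≤ fib i := fib_pos i
      have h0 : 1 ≤ fib j := fib_pos j
      have h3 : fib j ≤ fib j * fib i := by nlinarith
      omega

theorem fChar (n : Int) : f n = true ↔ P n := by
  by_cases hn : (1:Int) ≤ n
  · show fOuter (n+1).toNat n 1 1 1 1 1 = true ↔ P n
    obtain ⟨t, ht⟩ : ∃ t, (n+1).toNat = t + 1 := ⟨(n+1).toNat - 1, by omega⟩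
    rw [ht]
    show (if (1:Int) ≤ n then
        if fInner (n+1).toNat n 1 1 1 then true
        else fOuter t n (1 + 1) (1 + (1 + 1)) 1 (1 + 1) (1 + 1)
      else false) = true ↔ P n
    rw [if_pos hn]
    have hin := innerChar (n+1).toNat n 1 (le_refl 1) 0 (by
      have : (1:Int) * fib (0+1) = 1 := rfl
      omega)
    split
    · next hi =>
        simp only [true_iff]
        obtain ⟨i, hi1, hie⟩ := hin.mp hi
        rcases Nat.lt_or_ge i 2 with h' | h'
        · have : i = 1 := by omega
          subst this
          left
          simpa using hie.symm
        · right
          refine ⟨1, fib i, ⟨1, le_refl 1, rfl⟩, ⟨i, by omega, rfl⟩, ?_, by simpa using hie⟩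
          have : fib 1 < fib i := fib_strict_mono (le_refl 1) (by omega)
          simpa using this
    · next hi =>
        have step := outerChar t n 1 (le_refl 1) (by
          clear hin hi
          have h2 : fib (1+1) = (2:Int) := rfl
          omega)
        have step' : fOuter t n (1 + 1) (1 + (1 + 1)) 1 (1 + 1) (1 + 1) = true ↔
            ∃ j i : Nat, 2 ≤ j ∧ j + 1 ≤ i ∧ fib j * fib i = n := step
        rw [step']
        constructor
        · rintro ⟨j, i, hj, hji, he⟩
          right
          exact ⟨fib j, fib i, ⟨j, by omega, rfl⟩, ⟨i, by omega, rfl⟩,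
            fib_strict_mono (by omega) (by omega), he⟩
        · intro hP
          rcases hP with h1 | ⟨p, q, ⟨jp, hjp1, hp⟩, ⟨jq, hjq1, hq⟩, hpq, he⟩
          · exact absurd (hin.mpr ⟨1, le_refl 1, by rw [h1]; decide⟩) hi
          · have hjlt : jp < jq := fib_index_lt (by omega)
            by_cases hp1 : p = 1
            · refine absurd (hin.mpr ⟨jq, by omega, ?_⟩) hi
              have hx : (1:Int) * fib jq = p * q := by rw [hq, hp1]
              omega
            · have hp2 : 2 ≤ p := by have := fib_pos jp; omega
              have hjp2 : 2 ≤ jp := by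
                by_contra hcon
                have : jp = 1 := by omega
                subst this
                have : fib 1 = (1:Int) := rfl
                omega
              exact ⟨jp, jq, by omega, by omega, by rw [hp, hq]; exact he⟩
  · constructor
    · intro hf
      exfalso
      have : f n = false := by
        show fOuter (n+1).toNat n 1 1 1 1 1 = false
        rcases Nat.eq_zero_or_pos (n+1).toNat with h0 | h0
        · rw [h0]; rfl
        · obtain ⟨t, ht⟩ : ∃ t, (n+1).toNat = t + 1 := ⟨(n+1).toNat - 1, by omega⟩
          rw [ht]
          show (if (1:Int) ≤ n then _ else false) = false
          rw [if_neg hn]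
      rw [this] at hf; exact absurd hf (by decide)
    · intro h
      exact absurd (P_pos h) hn

theorem fibSet_mem (fuel : Nat) (n : Int) (k : Nat) (s : PySem.Set Int) (v : Int)
    (hfuel : (n + 1 - (k:Int)).toNat < fuel) :
    (v ∈ fibSet fuel n (fib k) (fib (k+1)) s) ↔
      v ∈ s ∨ ∃ i : Nat, k ≤ i ∧ fib i = v ∧ fib i ≤ n := by
  induction fuel generalizing k s with
  | zero => omega
  | succ t ih =>
    show (v ∈ if fib k ≤ n then fibSet t n (fib (k+1)) (fib k + fib (k+1)) (PySem.Set.add s (fib k))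
        else s) ↔ _
    by_cases h : fib k ≤ n
    · rw [if_pos h]
      have hkn : (k:Int) ≤ n := le_trans (fib_ge_index k) h
      have step := ih (k+1) (PySem.Set.add s (fib k)) (by push_cast; omega)
      constructor
      · intro hh
        rcases step.mp hh with hh' | ⟨i, hi, hfi, hfn⟩
        · rcases (PySem.Set.mem_add _ _ _).mp hh' with hs | hv
          · exact Or.inl hs
          · exact Or.inr ⟨k, le_refl k, hv.symm, h⟩
        · exact Or.inr ⟨i, by omega, hfi, hfn⟩
      · intro hh
        rcases hh with hs | ⟨i, hi, hfi, hfn⟩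
        · exact step.mpr (Or.inl ((PySem.Set.mem_add _ _ _).mpr (Or.inl hs)))
        · rcases Nat.lt_or_ge i (k+1) with h' | h'
          · have : i = k := by omega
            subst this
            exact step.mpr (Or.inl ((PySem.Set.mem_add _ _ _).mpr (Or.inr hfi.symm)))
          · exact step.mpr (Or.inr ⟨i, h', hfi, hfn⟩)
    · rw [if_neg h]
      constructor
      · exact Or.inl
      · intro hh
        rcases hh with hs | ⟨i, hi, hfi, hfn⟩
        · exact hs
        · have := fib_mono hi
          omega

theorem faltChar (n : Int) : f_alt n = true ↔ P n := by
  by_cases hn : (1:Int) ≤ n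
  · unfold f_alt
    have hmem : ∀ v : Int,
        (v ∈ fibSet (n+2).toNat n 1 1 PySem.Set.empty) ↔
          ∃ i : Nat, fib i = v ∧ fib i ≤ n := by
      intro v
      have hh := fibSet_mem (n+2).toNat n 0 PySem.Set.empty v (by omega)
      constructor
      · intro hv
        rcases hh.mp hv with hs | ⟨i, _, hfi, hfn⟩
        · exact absurd hs (List.not_mem_nil)
        · exact ⟨i, hfi, hfn⟩
      · rintro ⟨i, hfi, hfn⟩
        exact hh.mpr (Or.inr ⟨i, Nat.zero_le i, hfi, hfn⟩)
    simp only [Bool.or_eq_true, List.any_eq_true, Bool.and_eq_true, decide_eq_true_iff,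
      PySem.Set.contains_iff]
    constructor
    · rintro (⟨p, hps, ⟨hmod, hqs⟩, hne⟩ | h1)
      · obtain ⟨i, hfi, hfn⟩ := (hmem p).mp hps
        obtain ⟨j, hfj, hfjn⟩ := (hmem _).mp hqs
        have hp1 : 1 ≤ p := by have := fib_pos i; omega
        have hdvd : p ∣ n := (PySem.Int.mod_eq_zero_iff_dvd n p).mp hmod
        have hfd : PySem.Int.floordiv n p = n / p :=
          PySem.Int.floordiv_eq_ediv_of_pos (by omega)
        have hprod : p * (n / p) = n := Int.mul_ediv_cancel' hdvd
        rw [hfd] at hne hfj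
        right
        rcases lt_trichotomy p (n / p) with hlt | heq | hgt
        · refine ⟨p, n / p, ?_, ?_, hlt, hprod⟩
          · rcases Nat.eq_zero_or_pos i with h0 | h0
            · exact ⟨1, le_refl 1, by subst h0; exact hfi⟩
            · exact ⟨i, h0, hfi⟩
          · rcases Nat.eq_zero_or_pos j with h0 | h0
            · exact ⟨1, le_refl 1, by subst h0; exact hfj⟩
            · exact ⟨j, h0, hfj⟩
        · exact absurd heq.symm hne
        · refine ⟨n / p, p, ?_, ?_, hgt, by rw [mul_comm]; exact hprod⟩
          · rcases Nat.eq_zero_or_pos j with h0 | h0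
            · exact ⟨1, le_refl 1, by subst h0; exact hfj⟩
            · exact ⟨j, h0, hfj⟩
          · rcases Nat.eq_zero_or_pos i with h0 | h0
            · exact ⟨1, le_refl 1, by subst h0; exact hfi⟩
            · exact ⟨i, h0, hfi⟩
      · exact Or.inl h1
    · intro hP
      rcases hP with h1 | ⟨p, q, ⟨i, hi1, hp⟩, ⟨j, hj1, hq⟩, hpq, he⟩
      · exact Or.inr h1
      · left
        have hp1 : 1 ≤ p := by have := fib_pos i; omega
        have hq1 : 1 ≤ q := by have := fib_pos j; omega
        have hpn : p ≤ n := by nlinarith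
        have hqn : q ≤ n := by nlinarith
        have hfd : PySem.Int.floordiv n p = q := by
          rw [PySem.Int.floordiv_eq_ediv_of_pos (by omega), ← he,
            Int.mul_ediv_cancel_left q (by omega)]
        refine ⟨p, (hmem p).mpr ⟨i, hp, by omega⟩, ⟨?_, ?_⟩, ?_⟩
        · exact (PySem.Int.mod_eq_zero_iff_dvd n p).mpr ⟨q, he.symm⟩
        · rw [hfd]; exact (hmem q).mpr ⟨j, hq, by omega⟩
        · rw [hfd]; omega
  · constructor
    · intro hf
      exfalso
      have hs : fibSet (n+2).toNat n 1 1 PySem.Set.empty = PySem.Set.empty := by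
        rcases Nat.eq_zero_or_pos (n+2).toNat with h0 | h0
        · rw [h0]; rfl
        · obtain ⟨t, ht⟩ : ∃ t, (n+2).toNat = t + 1 := ⟨(n+2).toNat - 1, by omega⟩
          rw [ht]
          show (if (1:Int) ≤ n then _ else _) = _
          rw [if_neg hn]
      unfold f_alt at hf
      rw [hs] at hf
      simp only [Bool.or_eq_true, decide_eq_true_iff] at hf
      rcases hf with hf | hf
      · simp at hf
      · omega
    · intro h
      exact absurd (P_pos h) hn

-- ===== VERDICT (by name: the statement is the Claim_ definition above) =====
theorem f_spec : Claim_equal_f := by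
  intro n _
  unfold Spec_f
  rw [Bool.eq_iff_iff, fChar, faltChar]
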